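-- pv_equiv track=rewrite | github.com/mjseok/codingtest_practice | Python/1121_8.py | solution
-- ===== SOURCE A (Python) =====
-- def solution(price, money, count):
--     answer = -1
--     need=0
--     for i in range(count):
--         need+=(i+1)*price
--     answer=need-money
--     if answer<0:
--         answer=0
--     return answer
-- ===== SOURCE B (Python) =====
-- def solution(price, money, count):
--     n = count if count > 0 else 0
--     return max(price * n * (n + 1) // 2 - money, 0)
-- ===== Notes on version B (the rewrite author's own statement) =====
-- stated objective: faster
-- what changed: Replaces the O(count) summation loop with the arithmetic-series closed form price*n*(n+1)//2 (n = count clamped at 0) and max with 0.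
import Mathlib
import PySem

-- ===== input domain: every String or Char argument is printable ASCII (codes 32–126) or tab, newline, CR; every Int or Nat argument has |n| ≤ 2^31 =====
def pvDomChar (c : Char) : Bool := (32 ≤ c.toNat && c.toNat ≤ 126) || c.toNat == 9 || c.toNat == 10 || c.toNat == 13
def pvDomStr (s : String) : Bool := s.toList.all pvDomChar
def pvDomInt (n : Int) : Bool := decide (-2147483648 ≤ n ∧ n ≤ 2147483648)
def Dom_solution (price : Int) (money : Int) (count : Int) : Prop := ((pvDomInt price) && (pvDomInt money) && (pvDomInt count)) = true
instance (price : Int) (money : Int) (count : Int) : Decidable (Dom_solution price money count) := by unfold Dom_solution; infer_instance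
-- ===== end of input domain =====

-- B replaces A's O(count) summation loop by the O(1) arithmetic-series closed form (objective: faster).

-- ===== PORT A =====
def solution (price : Int) (money : Int) (count : Int) : Int :=
  let need := (PySem.List.pyRange 0 count 1).foldl (fun need i => need + (i + 1) * price) 0
  let answer := need - money
  if answer < 0 then 0 else answer

-- ===== PORT B =====
def solution_alt (price : Int) (money : Int) (count : Int) : Int :=
  let n : Int := if count > 0 then count else 0
  max (PySem.Int.floordiv (price * n * (n + 1)) 2 - money) 0

-- ===== PRECONDITION & SPEC =====
def Spec_solution (price : Int) (money : Int) (count : Int) (out : Int) : Prop := out = solution_alt price money count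
instance (price : Int) (money : Int) (count : Int) (out : Int) : Decidable (Spec_solution price money count out) := by unfold Spec_solution; infer_instance

-- ===== CLAIM (what is proved, stated in full; the proofs are below) =====
def Claim_equal_solution : Prop := ∀ (price : Int) (money : Int) (count : Int), Dom_solution price money count → Spec_solution price money count (solution price money count)

-- ===== LEMMAS AND PROOFS =====

theorem foldl_shift (price : Int) (l : List Int) (init : Int) :
    l.foldl (fun a i => a + (i + 1) * price) init
      = init + l.foldl (fun a i => a + (i + 1) * price) 0 := by
  induction l generalizing init with
  | nil => simp
  | cons x xs ih =>
    simp only [List.foldl_cons]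
    rw [ih, ih ((0 : Int) + (x + 1) * price)]
    ring

theorem sum_closed (price : Int) (n : Nat) :
    2 * ((PySem.List.pyRange 0 (n : Int) 1).foldl (fun a i => a + (i + 1) * price) 0)
      = price * (n : Int) * ((n : Int) + 1) := by
  induction n with
  | zero => simp [PySem.List.pyRange_one_eq_nil]
  | succ m ih =>
    have h : PySem.List.pyRange 0 ((m : Int) + 1) 1
        = PySem.List.pyRange 0 (m : Int) 1 ++ [(m : Int)] :=
      PySem.List.pyRange_one_succ_right (by positivity)
    push_cast
    rw [h, List.foldl_append]
    simp only [List.foldl_cons, List.foldl_nil]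
    rw [foldl_shift]
    push_cast at ih
    ring_nf
    ring_nf at ih
    linarith

theorem solution_eq_alt (price money count : Int) :
    solution price money count = solution_alt price money count := by
  unfold solution solution_alt
  by_cases hc : count > 0
  · have hn : count = ((count.toNat : Nat) : Int) := by omega
    have key := sum_closed price count.toNat
    rw [← hn] at key
    have hfd : PySem.Int.floordiv (price * count * (count + 1)) 2
        = (PySem.List.pyRange 0 count 1).foldl (fun a i => a + (i + 1) * price) 0 := by
      rw [← key, PySem.Int.floordiv_eq_ediv_of_pos (by norm_num)]
      omega
    simp only [if_pos hc, hfd]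
    omega
  · have h0 : PySem.List.pyRange 0 count 1 = [] :=
      PySem.List.pyRange_one_eq_nil (by omega)
    simp only [if_neg hc, h0, List.foldl_nil]
    have : PySem.Int.floordiv (price * 0 * (0 + 1)) 2 = 0 := by
      rw [PySem.Int.floordiv_eq_ediv_of_pos (by norm_num)]; simp
    rw [this]
    omega

-- ===== VERDICT (by name: the statement is the Claim_ definition above) =====
theorem solution_spec : Claim_equal_solution := by
  intro price money count _
  exact solution_eq_alt price money count
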